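-- pv_equiv track=rewrite | github.com/1aljaz/Programiranje1_Vaje | kattis/alicedigital.py | razsiri
-- ===== SOURCE A (Python) =====
-- def razsiri(podatki, m):
--     """
--         Program vrne maksimalno obtezeno vsoto seznama, ki vsebuje element m, pri cimer je element m tudi minimum.
--     """
--     n = len(podatki)
--     maksimum = 0
--
--     for i in range(n):
--         if podatki[i] != m:
--             continue
--
--         # Pogledamo vse elemente levo od najdenega indeksa
--         levo = i
--         while levo > 0 and podatki[levo - 1] > m:
--             levo -= 1
--
--         # pogledamo vse elemente desno od najdenega indeksa
--         desno = i
--         while desno < n - 1 and podatki[desno + 1] > m: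
--             desno += 1
--
--         weight = sum(podatki[levo:desno + 1])
--         maksimum = max(maksimum, weight)
--
--     return maksimum
-- ===== SOURCE B (Python) =====
-- def razsiri(podatki, m):
--     """One linear pass: keep the running sum of the current run of elements > m;
--     a pending window (left run + m) is completed at the next barrier or at the end."""
--     best = 0
--     run = 0
--     pending = None
--     for x in podatki:
--         if x > m:
--             run += x
--         else:
--             if pending is not None:
--                 best = max(best, pending + run)
--             pending = run + m if x == m else None
--             run = 0
--     if pending is not None:
--         best = max(best, pending + run)
--     return best
-- ===== Notes on version B (the rewrite author's own statement) =====
-- stated objective: alternative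
-- what changed: Replaced the per-occurrence left/right expansion loops and repeated slice sum() with a single linear pass that maintains the running sum of the current >m run and a pending (left-run + m) window finalized at the next barrier or at the end.
import Mathlib
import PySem

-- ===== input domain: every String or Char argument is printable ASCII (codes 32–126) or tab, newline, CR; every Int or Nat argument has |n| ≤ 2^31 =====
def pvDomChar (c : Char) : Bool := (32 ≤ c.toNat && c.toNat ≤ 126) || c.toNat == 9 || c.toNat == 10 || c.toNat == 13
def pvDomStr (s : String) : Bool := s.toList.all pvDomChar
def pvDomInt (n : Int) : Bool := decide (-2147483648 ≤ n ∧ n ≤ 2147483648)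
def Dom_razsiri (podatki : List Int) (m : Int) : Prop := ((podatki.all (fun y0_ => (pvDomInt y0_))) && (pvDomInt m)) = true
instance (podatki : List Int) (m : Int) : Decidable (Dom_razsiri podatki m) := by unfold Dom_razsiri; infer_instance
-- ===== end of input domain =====

-- B replaces A's per-m-occurrence left/right expansion loops and slice sums with one
-- linear pass keeping a running run-sum and a pending window (objective: alternative).

-- ===== PORT A =====
-- while levo > 0 and podatki[levo-1] > m: levo -= 1   (fuel = initial levo, always sufficient)
def levoLoopA (xs : List Int) (m : Int) : Int → Nat → Int
  | levo, 0 => levo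
  | levo, fuel + 1 =>
    if 0 < levo ∧ m < PySem.List.pyGetD xs (levo - 1) 0 then
      levoLoopA xs m (levo - 1) fuel
    else levo

-- while desno < n - 1 and podatki[desno+1] > m: desno += 1   (fuel = n - 1 - desno)
def desnoLoopA (xs : List Int) (m : Int) : Int → Nat → Int
  | desno, 0 => desno
  | desno, fuel + 1 =>
    if desno < (xs.length : Int) - 1 ∧ m < PySem.List.pyGetD xs (desno + 1) 0 then
      desnoLoopA xs m (desno + 1) fuel
    else desno

def razsiri (podatki : List Int) (m : Int) : Int :=
  let n : Int := podatki.length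
  (PySem.List.pyRange 0 n 1).foldl
    (fun maksimum i =>
      if PySem.List.pyGetD podatki i 0 ≠ m then maksimum
      else
        let levo := levoLoopA podatki m i i.toNat
        let desno := desnoLoopA podatki m i (n - 1 - i).toNat
        let weight := (PySem.List.slice podatki (some levo) (some (desno + 1))).sum
        max maksimum weight) 0

-- ===== PORT B =====
def bstep (m : Int) (st : Int × Int × Option Int) (x : Int) : Int × Int × Option Int :=
  let (best, run, pending) := st
  if m < x then (best, run + x, pending)
  else
    let best := match pending with | some p => max best (p + run) | none => best
    let pending := if x = m then some (run + m) else none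
    (best, 0, pending)

def bflush : Int × Int × Option Int → Int
  | (best, run, some p) => max best (p + run)
  | (best, _, none) => best

def razsiri_alt (podatki : List Int) (m : Int) : Int :=
  bflush (podatki.foldl (bstep m) (0, 0, none))

-- ===== PRECONDITION & SPEC =====
def Spec_razsiri (podatki : List Int) (m : Int) (out : Int) : Prop := out = razsiri_alt podatki m
instance (podatki : List Int) (m : Int) (out : Int) : Decidable (Spec_razsiri podatki m out) := by unfold Spec_razsiri; infer_instance

-- ===== CLAIM (what is proved, stated in full; the proofs are below) =====
def Claim_equal_razsiri : Prop := ∀ (podatki : List Int) (m : Int), Dom_razsiri podatki m → Spec_razsiri podatki m (razsiri podatki m)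

-- ===== LEMMAS AND PROOFS =====

-- predicate "strictly greater than m"
def pgt (m : Int) (x : Int) : Bool := decide (m < x)

-- sum of the leading run of >m elements
def rsum (m : Int) (t : List Int) : Int := (t.takeWhile (pgt m)).sum

-- the list of window sums of the occurrences of m, left to right; c = sum of the current left run
def win (m : Int) : List Int → Int → List Int
  | [], _ => []
  | x :: t, c =>
    if m < x then win m t (c + x)
    else if x = m then (c + m + rsum m t) :: win m t 0 else win m t 0

-- Nat version of the levo loop
def levoN (xs : List Int) (m : Int) : Nat → Nat
  | 0 => 0
  | l + 1 => if m < xs.getD l 0 then levoN xs m l else l + 1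

-- closed form of the desno loop
def desnoN (xs : List Int) (m : Int) (d : Nat) : Nat :=
  d + ((xs.drop (d + 1)).takeWhile (pgt m)).length

def wN (xs : List Int) (m : Int) (i : Nat) : Int :=
  ((xs.drop (levoN xs m i)).take (desnoN xs m i + 1 - levoN xs m i)).sum

def stepN (xs : List Int) (m : Int) (acc : Int) (i : Nat) : Int :=
  if xs.getD i 0 ≠ m then acc else max acc (wN xs m i)

def AfoldN (xs : List Int) (m : Int) : Int :=
  (List.range xs.length).foldl (stepN xs m) 0

theorem levoA_bridge (xs : List Int) (m : Int) : ∀ k : Nat,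
    levoLoopA xs m (k : Int) k = ((levoN xs m k : Nat) : Int) := by
  intro k
  induction k with
  | zero => simp [levoLoopA, levoN]
  | succ l ih =>
    have hidx : ((l : Int) + 1) - 1 = (l : Int) := by ring
    simp only [levoLoopA, levoN, Nat.cast_add, Nat.cast_one, hidx,
      PySem.List.pyGetD_natCast]
    by_cases hx : m < xs.getD l 0
    · rw [if_pos (And.intro (by omega) hx), if_pos hx, ih]
    · have hc : ¬ ((0:Int) < (l:Int) + 1 ∧ m < xs.getD l 0) := by tauto
      rw [if_neg hc, if_neg hx]; push_cast; ring

theorem desnoN_stop (xs : List Int) (m : Int) (d : Nat) (h : ¬ d + 1 < xs.length) :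
    desnoN xs m d = d := by
  unfold desnoN
  rw [List.drop_eq_nil_of_le (by omega)]
  simp

theorem desnoA_bridge (xs : List Int) (m : Int) : ∀ (c d : Nat),
    c = xs.length - (d + 1) →
    desnoLoopA xs m (d : Int) c = ((desnoN xs m d : Nat) : Int) := by
  intro c
  induction c with
  | zero =>
    intro d hc
    have hlen : xs.length ≤ d + 1 := by omega
    have hcond : ¬ ((d : Int) < (xs.length : Int) - 1 ∧
        m < PySem.List.pyGetD xs ((d : Int) + 1) 0) := by
      intro ⟨h1, _⟩; omega
    simp only [desnoLoopA, desnoN_stop xs m d (by omega)]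
  | succ c ih =>
    intro d hc
    have hd1 : d + 1 < xs.length := by omega
    have hcast : ((d : Int) + 1) = ((d + 1 : Nat) : Int) := by push_cast; ring
    have hget : PySem.List.pyGetD xs ((d : Int) + 1) 0 = xs.getD (d + 1) 0 := by
      rw [hcast, PySem.List.pyGetD_natCast]
    have hdrop : xs.drop (d + 1) = xs[d + 1] :: xs.drop (d + 2) :=
      List.drop_eq_getElem_cons hd1
    have hgetd : xs.getD (d + 1) 0 = xs[d + 1] := List.getD_eq_getElem xs 0 hd1
    by_cases hx : m < xs.getD (d + 1) 0
    · have hcond : (d : Int) < (xs.length : Int) - 1 ∧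
          m < PySem.List.pyGetD xs ((d : Int) + 1) 0 := by
        constructor
        · omega
        · rw [hget]; exact hx
      have heq : desnoN xs m d = desnoN xs m (d + 1) := by
        unfold desnoN
        rw [hdrop, List.takeWhile_cons, show pgt m xs[d+1] = true by
          simp [pgt]; rw [← hgetd]; exact hx]
        simp [Nat.add_assoc]
        omega
      simp only [desnoLoopA]
      rw [if_pos hcond, hcast, heq]
      exact ih (d + 1) (by omega)
    · have hcond : ¬ ((d : Int) < (xs.length : Int) - 1 ∧
          m < PySem.List.pyGetD xs ((d : Int) + 1) 0) := by
        rw [hget]; tauto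
      have heq : desnoN xs m d = d := by
        unfold desnoN
        rw [hdrop, List.takeWhile_cons, show pgt m xs[d+1] = false by
          simp [pgt]; rw [← hgetd] at *; omega]
        simp
      simp only [desnoLoopA, if_neg hcond, heq]

theorem razsiri_eq_AfoldN (xs : List Int) (m : Int) : razsiri xs m = AfoldN xs m := by
  unfold razsiri AfoldN
  dsimp only
  rw [PySem.List.pyRange_zero_natCast, List.foldl_map]
  apply PySem.List.foldl_congr_mem
  intro acc i hi
  have hi' : i < xs.length := List.mem_range.mp hi
  simp only [PySem.List.pyGetD_natCast, stepN]
  by_cases hne : xs.getD i 0 ≠ m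
  · simp only [if_pos hne]
  · simp only [if_neg hne]
    rw [Int.toNat_natCast, levoA_bridge,
      desnoA_bridge xs m (((xs.length : Int) - 1 - (i : Int)).toNat) i (by omega)]
    rw [show ((desnoN xs m i : Nat) : Int) + 1 = ((desnoN xs m i + 1 : Nat) : Int) by push_cast; ring]
    rw [PySem.List.slice_natCast]
    rfl

theorem foldl_max_comm (l : List Int) : ∀ b v : Int,
    List.foldl max (max b v) l = max (List.foldl max b l) v := by
  induction l with
  | nil => intro b v; rfl
  | cons x t ih =>
    intro b v
    simp only [List.foldl_cons]
    rw [max_right_comm, ih]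

theorem stepN_max (xs : List Int) (m : Int) (l : List Nat) : ∀ a b : Int,
    l.foldl (stepN xs m) (max a b) = max a (l.foldl (stepN xs m) b) := by
  induction l with
  | nil => intro a b; rfl
  | cons i t ih =>
    intro a b
    simp only [List.foldl_cons, stepN]
    by_cases h : xs.getD i 0 ≠ m
    · simp only [if_pos h, ih]
    · simp only [if_neg h, max_assoc, ih]

theorem foldl_skip (xs : List Int) (m : Int) (l : List Nat)
    (h : ∀ i ∈ l, xs.getD i 0 ≠ m) : ∀ acc : Int, l.foldl (stepN xs m) acc = acc := by
  induction l with
  | nil => intro acc; rfl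
  | cons i t ih =>
    intro acc
    simp only [List.foldl_cons, stepN, if_pos (h i (List.mem_cons_self))]
    exact ih (fun j hj => h j (List.mem_cons_of_mem i hj)) acc

theorem foldl_max_nonneg (l : List Int) : ∀ a : Int, a ≤ l.foldl max a := by
  induction l with
  | nil => intro a; exact le_refl a
  | cons x t ih => intro a; exact le_trans (le_max_left a x) (ih (max a x))

theorem win_run (m : Int) (r : List Int) : ∀ (t : List Int) (c : Int),
    (∀ y ∈ r, m < y) → win m (r ++ t) c = win m t (c + r.sum) := by
  induction r with
  | nil => intro t c _; simp
  | cons y r ih =>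
    intro t c hr
    have hy : m < y := hr y (List.mem_cons_self)
    simp only [List.cons_append, win, if_pos hy, List.sum_cons]
    rw [ih t (c + y) (fun z hz => hr z (List.mem_cons_of_mem y hz))]
    ring_nf

theorem levoN_all (xs : List Int) (m : Int) : ∀ k : Nat,
    (∀ l < k, m < xs.getD l 0) → levoN xs m k = 0 := by
  intro k
  induction k with
  | zero => intro _; rfl
  | succ l ih =>
    intro h
    simp only [levoN, if_pos (h l (by omega))]
    exact ih (fun j hj => h j (by omega))

theorem levoN_shift (q t : List Int) (m : Int) (hne : q ≠ [])
    (hq : ¬ m < q.getD (q.length - 1) 0) : ∀ j : Nat,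
    levoN (q ++ t) m (q.length + j) = q.length + levoN t m j := by
  intro j
  induction j with
  | zero =>
    have hql : 0 < q.length := List.length_pos_iff.mpr hne
    obtain ⟨l, hl⟩ : ∃ l, q.length = l + 1 := ⟨q.length - 1, by omega⟩
    rw [show q.length + 0 = l + 1 by omega]
    have hget : (q ++ t).getD l 0 = q.getD l 0 := List.getD_append q t 0 l (by omega)
    simp only [levoN, hget]
    rw [if_neg (by rw [show l = q.length - 1 by omega]; exact hq)]
    omega
  | succ j ih =>
    have hget : (q ++ t).getD (q.length + j) 0 = t.getD j 0 := by
      rw [List.getD_append_right q t 0 (q.length + j) (by omega)]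
      congr 1; omega
    rw [show q.length + (j + 1) = (q.length + j) + 1 by omega]
    simp only [levoN, hget]
    by_cases hx : m < t.getD j 0
    · rw [if_pos hx, if_pos hx, ih]
    · rw [if_neg hx, if_neg hx]; omega

theorem desnoN_shift (q t : List Int) (m : Int) (j : Nat) :
    desnoN (q ++ t) m (q.length + j) = q.length + desnoN t m j := by
  unfold desnoN
  rw [show q.length + j + 1 = q.length + (j + 1) by omega]
  rw [List.drop_append (l₁ := q) (l₂ := t)]
  rw [List.drop_eq_nil_of_le (by omega), List.nil_append]
  rw [show q.length + (j + 1) - q.length = j + 1 by omega]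
  omega

theorem wN_shift (q t : List Int) (m : Int) (hne : q ≠ [])
    (hq : ¬ m < q.getD (q.length - 1) 0) (j : Nat) :
    wN (q ++ t) m (q.length + j) = wN t m j := by
  unfold wN
  rw [levoN_shift q t m hne hq, desnoN_shift]
  rw [List.drop_append (l₁ := q) (l₂ := t)]
  rw [List.drop_eq_nil_of_le (by omega), List.nil_append]
  rw [show q.length + levoN t m j - q.length = levoN t m j by omega]
  rw [show q.length + desnoN t m j + 1 - (q.length + levoN t m j)
        = desnoN t m j + 1 - levoN t m j by omega]

theorem take_takeWhile_len {α : Type} (p : α → Bool) (l : List α) :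
    l.take ((l.takeWhile p).length) = l.takeWhile p := by
  induction l with
  | nil => rfl
  | cons x t ih =>
    by_cases hx : p x
    · simp [hx, ih]
    · simp [hx]

theorem dropWhile_cons_false {α : Type} (p : α → Bool) (l : List α) :
    ∀ x t, l.dropWhile p = x :: t → p x = false := by
  induction l with
  | nil => intro x t h; simp [List.dropWhile] at h
  | cons y l ih =>
    intro x t h
    by_cases hy : p y
    · exact ih x t (by simpa [List.dropWhile_cons, hy] using h)
    · rw [List.dropWhile_cons, if_neg hy] at h
      injection h with h1 _
      rw [← h1]; simpa using hy

theorem head_window (r t : List Int) (m : Int) (hr : ∀ y ∈ r, m < y) :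
    wN (r ++ m :: t) m r.length = r.sum + m + rsum m t := by
  have hlev : levoN (r ++ m :: t) m r.length = 0 := by
    apply levoN_all
    intro l hl
    rw [List.getD_append r (m :: t) 0 l hl, List.getD_eq_getElem r 0 hl]
    exact hr _ (List.getElem_mem hl)
  have hdes : desnoN (r ++ m :: t) m r.length
      = r.length + ((t.takeWhile (pgt m)).length) := by
    unfold desnoN
    rw [show r.length + 1 = (r ++ [m]).length by simp]
    rw [show r ++ m :: t = (r ++ [m]) ++ t by simp]
    rw [List.drop_append (l₁ := r ++ [m]) (l₂ := t)]
    rw [List.drop_eq_nil_of_le (by simp), List.nil_append]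
    simp
  unfold wN
  rw [hlev, hdes, List.drop_zero]
  rw [show r.length + (t.takeWhile (pgt m)).length + 1 - 0
        = (r ++ [m]).length + (t.takeWhile (pgt m)).length by simp; omega]
  rw [show r ++ m :: t = (r ++ [m]) ++ t by simp]
  rw [List.take_append (l₁ := r ++ [m]) (l₂ := t)]
  rw [List.take_of_length_le (by simp)]
  rw [show (r ++ [m]).length + (t.takeWhile (pgt m)).length - (r ++ [m]).length
        = (t.takeWhile (pgt m)).length by omega]
  rw [take_takeWhile_len]
  simp [rsum]
  ring

theorem AfoldN_eq_win (m : Int) (xs : List Int) :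
    AfoldN xs m = List.foldl max 0 (win m xs 0) := by
  rcases hsplit : xs.dropWhile (pgt m) with _ | ⟨x, t⟩
  · have hall : ∀ y ∈ xs, pgt m y = true := List.dropWhile_eq_nil_iff.mp hsplit
    have h0 : AfoldN xs m = 0 := by
      apply foldl_skip
      intro i hi
      have hi' := List.mem_range.mp hi
      rw [List.getD_eq_getElem xs 0 hi']
      have := hall _ (List.getElem_mem hi')
      simp only [pgt, decide_eq_true_eq] at this
      omega
    have hwin : win m xs 0 = [] := by
      conv_lhs => rw [show xs = xs.takeWhile (pgt m) ++ ([] : List Int) by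
        rw [← hsplit, List.takeWhile_append_dropWhile]]
      rw [win_run m _ [] 0 (fun y hy => by
        have := List.mem_takeWhile_imp hy
        simpa [pgt] using this)]
      rfl
    rw [h0, hwin]; rfl
  · have hxle : ¬ m < x := by
      have := dropWhile_cons_false (pgt m) xs x t hsplit
      simp only [pgt, decide_eq_false_iff_not] at this
      exact this
    have hr : ∀ y ∈ xs.takeWhile (pgt m), m < y := fun y hy => by
      have := List.mem_takeWhile_imp hy
      simpa [pgt] using this
    have hxs : xs = xs.takeWhile (pgt m) ++ x :: t := by
      rw [← hsplit, List.takeWhile_append_dropWhile]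
    set r := xs.takeWhile (pgt m) with hrdef
    set k := r.length with hk
    have hlen : xs.length = (k + 1) + t.length := by
      rw [hxs]; simp [hk]; omega
    have hqne : (r ++ [x]) ≠ [] := by simp
    have hqget : ¬ m < (r ++ [x]).getD ((r ++ [x]).length - 1) 0 := by
      have hg : (r ++ [x]).getD ((r ++ [x]).length - 1) 0 = x := by
        rw [List.getD_append_right r [x] 0 _ (by simp)]
        simp
      rw [hg]; exact hxle
    have hq : r ++ x :: t = (r ++ [x]) ++ t := by simp
    have hA0skip : ∀ acc : Int, (List.range k).foldl (stepN xs m) acc = acc := fun acc =>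
      foldl_skip xs m _ (fun i hi => by
        have hi' := List.mem_range.mp hi
        rw [hxs, List.getD_append r (x :: t) 0 i hi', List.getD_eq_getElem r 0 hi']
        have := hr _ (List.getElem_mem hi')
        omega) acc
    have hshiftget : ∀ j : Nat, xs.getD (k + 1 + j) 0 = t.getD j 0 := fun j => by
      rw [hxs, hq, List.getD_append_right (r ++ [x]) t 0 _ (by simp [hk, Nat.add_comm])]
      congr 1
      simp [hk]
    have hshiftw : ∀ j : Nat, wN xs m (k + 1 + j) = wN t m j := fun j => by
      rw [hxs, hq, show k + 1 + j = (r ++ [x]).length + j by simp [hk]]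
      exact wN_shift (r ++ [x]) t m hqne hqget j
    have hgetk : xs.getD k 0 = x := by
      rw [hxs, List.getD_append_right r (x :: t) 0 k (le_refl k)]
      rw [show k - r.length = 0 from by omega]
      rfl
    unfold AfoldN
    rw [hlen, List.range_add, List.foldl_append,
      show List.range (k + 1) = List.range k ++ [k] from List.range_succ,
      List.foldl_append, hA0skip, List.foldl_map]
    rw [PySem.List.foldl_congr_mem (List.range t.length)
      (fun acc j => stepN xs m acc (k + 1 + j)) (stepN t m) _
      (fun acc j hj => by simp only [stepN, hshiftget j, hshiftw j])]
    have hrec : List.foldl (stepN t m) 0 (List.range t.length) = List.foldl max 0 (win m t 0) :=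
      AfoldN_eq_win m t
    have hF : 0 ≤ List.foldl max 0 (win m t 0) := foldl_max_nonneg _ 0
    conv_rhs => rw [hxs, win_run m r (x :: t) 0 hr]
    by_cases hxm : x = m
    · have hw : wN xs m k = r.sum + m + rsum m t := by
        rw [hxs, hxm]
        exact head_window r t m hr
      have hA0v : List.foldl (stepN xs m) 0 [k] = max 0 (wN xs m k) := by
        simp only [List.foldl_cons, List.foldl_nil, stepN, hgetk, hxm]
        simp
      rw [hA0v, hw]
      rw [show (max 0 (r.sum + m + rsum m t)) = max (max 0 (r.sum + m + rsum m t)) 0 by omega]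
      rw [stepN_max, hrec]
      simp only [win, if_neg hxle, if_pos hxm]
      rw [List.foldl_cons, foldl_max_comm]
      have harith : 0 + r.sum + m + rsum m t = r.sum + m + rsum m t := by ring
      rw [harith]
      omega
    · have hA0v : List.foldl (stepN xs m) 0 [k] = 0 := by
        simp only [List.foldl_cons, List.foldl_nil, stepN, hgetk]
        simp [hxm]
      rw [hA0v, hrec]
      simp only [win, if_neg hxle, if_neg hxm]
termination_by xs.length
decreasing_by
  omega


theorem bflush_foldl_max (m : Int) (t : List Int) : ∀ b v r : Int, ∀ pend : Option Int,
    bflush (t.foldl (bstep m) (max b v, r, pend)) =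
      max (bflush (t.foldl (bstep m) (b, r, pend))) v := by
  induction t with
  | nil =>
    intro b v r pend
    cases pend with
    | none => rfl
    | some p => simp only [List.foldl_nil, bflush]; rw [max_right_comm]
  | cons x t ih =>
    intro b v r pend
    simp only [List.foldl_cons, bstep]
    by_cases hx : m < x
    · simp only [if_pos hx]; exact ih b v (r + x) pend
    · simp only [if_neg hx]
      cases pend with
      | none => exact ih b v 0 _
      | some p =>
        simp only []
        rw [max_right_comm]
        exact ih (max b (p + r)) v 0 _

theorem rsum_nil (m : Int) : rsum m [] = 0 := rfl

theorem rsum_cons_pos (m x : Int) (t : List Int) (hx : m < x) :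
    rsum m (x :: t) = x + rsum m t := by
  simp [rsum, pgt, hx]

theorem rsum_cons_neg (m x : Int) (t : List Int) (hx : ¬ m < x) :
    rsum m (x :: t) = 0 := by
  simp [rsum, pgt, hx]

theorem bflush_foldl_pending (m : Int) (t : List Int) : ∀ b r p : Int,
    bflush (t.foldl (bstep m) (b, r, some p)) =
      max (bflush (t.foldl (bstep m) (b, r, none))) (p + r + rsum m t) := by
  induction t with
  | nil => intro b r p; simp [bflush, rsum_nil]
  | cons x t ih =>
    intro b r p
    simp only [List.foldl_cons, bstep]
    by_cases hx : m < x
    · simp only [if_pos hx]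
      rw [ih, rsum_cons_pos m x t hx]
      ring_nf
    · simp only [if_neg hx]
      rw [rsum_cons_neg m x t hx]
      rw [bflush_foldl_max]
      ring_nf

theorem bflush_foldl_none (m : Int) (t : List Int) : ∀ b r : Int,
    bflush (t.foldl (bstep m) (b, r, none)) = List.foldl max b (win m t r) := by
  induction t with
  | nil => intro b r; rfl
  | cons x t ih =>
    intro b r
    simp only [List.foldl_cons, bstep]
    by_cases hx : m < x
    · simp only [if_pos hx, win, ih]
    · simp only [if_neg hx]
      by_cases hxm : x = m
      · simp only [if_pos hxm, win, if_neg hx]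
        rw [bflush_foldl_pending, ih, List.foldl_cons, foldl_max_comm]
        ring_nf
      · simp only [if_neg hxm, win, if_neg hx, ih]

theorem alt_eq_win (m : Int) (xs : List Int) :
    razsiri_alt xs m = List.foldl max 0 (win m xs 0) := by
  unfold razsiri_alt
  exact bflush_foldl_none m xs 0 0

-- ===== VERDICT (by name: the statement is the Claim_ definition above) =====
theorem razsiri_spec : Claim_equal_razsiri := by
  intro podatki m _
  unfold Spec_razsiri
  rw [razsiri_eq_AfoldN, AfoldN_eq_win, alt_eq_win]
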